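-- pv_equiv track=rewrite | github.com/ccollier86/catalystindex | src/catalystindex/acquisition/firecrawl.py | _parser_hint_from_metadata
-- ===== SOURCE A (Python) =====
-- from typing import Dict, Optional
--
-- def _parser_hint_from_metadata(content_type: Optional[str], file_type: str) -> Optional[str]:
--     lowered = (content_type or "").lower()
--     if "pdf" in lowered or file_type == "pdf":
--         return "pdf"
--     if "html" in lowered or file_type == "html":
--         return "html"
--     if any(token in lowered for token in ("msword", "word")) or file_type in {"doc", "docx"}:
--         return "docx"
--     if "powerpoint" in lowered or file_type in {"ppt", "pptx"}:
--         return "pptx"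
--     if "excel" in lowered or file_type in {"xls", "xlsx"}:
--         return "xlsx"
--     if lowered.startswith("text/"):
--         return "plain_text"
--     return None
-- ===== SOURCE B (Python) =====
-- # B: two independent classifiers (content-type priority, file-type priority) merged by min.
-- from typing import Optional
--
-- _TOKEN_LEVELS = [("pdf",), ("html",), ("msword", "word"), ("powerpoint",), ("excel",)]
-- _FT_PRIORITY = {"pdf": 0, "html": 1, "doc": 2, "docx": 2, "ppt": 3, "pptx": 3,
--                 "xls": 4, "xlsx": 4}
-- _HINTS = ["pdf", "html", "docx", "pptx", "xlsx", "plain_text"]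
-- _NONE = 6
--
-- def _ct_priority(lowered: str) -> int:
--     for i, tokens in enumerate(_TOKEN_LEVELS):
--         if any(t in lowered for t in tokens):
--             return i
--     return 5 if lowered.startswith("text/") else _NONE
--
-- def _parser_hint_from_metadata(content_type: Optional[str], file_type: str) -> Optional[str]:
--     lowered = (content_type or "").lower()
--     p = min(_ct_priority(lowered), _FT_PRIORITY.get(file_type, _NONE))
--     return _HINTS[p] if p < _NONE else None
-- ===== Notes on version B (the rewrite author's own statement) =====
-- stated objective: alternative
-- what changed: Replaces the sequential OR-ed if-chain by two independent classifiers - a token-scan priority over content_type and a dict lookup priority over file_type - merged by taking the minimum priority and indexing a hint list.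
import Mathlib
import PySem

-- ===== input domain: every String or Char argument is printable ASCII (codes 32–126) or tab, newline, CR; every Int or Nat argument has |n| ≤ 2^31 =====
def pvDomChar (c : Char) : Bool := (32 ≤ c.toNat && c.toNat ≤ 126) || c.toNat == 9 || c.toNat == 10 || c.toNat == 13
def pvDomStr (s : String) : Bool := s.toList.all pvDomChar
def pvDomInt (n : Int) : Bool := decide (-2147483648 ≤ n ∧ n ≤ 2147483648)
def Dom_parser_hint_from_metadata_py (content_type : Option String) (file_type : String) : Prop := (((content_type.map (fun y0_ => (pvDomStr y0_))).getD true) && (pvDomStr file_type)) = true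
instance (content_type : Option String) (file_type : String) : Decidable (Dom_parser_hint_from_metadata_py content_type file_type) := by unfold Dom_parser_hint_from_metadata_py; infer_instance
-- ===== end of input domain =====

-- B decomposes A's OR-ed if-chain into two independent priority classifiers (content-type token scan, file-type dict lookup) merged by min (alternative; same cost).
-- ===== PORT A =====
def parser_hint_from_metadata_py (content_type : Option String) (file_type : String) : Option String :=
  let lowered := PySem.Str.lower (content_type.getD "")
  if PySem.Str.isIn "pdf" lowered || file_type == "pdf" then some "pdf"
  else if PySem.Str.isIn "html" lowered || file_type == "html" then some "html"
  else if (["msword", "word"].any (fun token => PySem.Str.isIn token lowered)) || (file_type == "doc" || file_type == "docx") then some "docx"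
  else if PySem.Str.isIn "powerpoint" lowered || (file_type == "ppt" || file_type == "pptx") then some "pptx"
  else if PySem.Str.isIn "excel" lowered || (file_type == "xls" || file_type == "xlsx") then some "xlsx"
  else if PySem.Str.startswith lowered "text/" then some "plain_text"
  else none

-- ===== PORT B =====
def pvTokenLevels : List (List String) := [["pdf"], ["html"], ["msword", "word"], ["powerpoint"], ["excel"]]
def pvFtPriority : PySem.Dict String Int :=
  PySem.Dict.ofList [("pdf", 0), ("html", 1), ("doc", 2), ("docx", 2), ("ppt", 3), ("pptx", 3), ("xls", 4), ("xlsx", 4)]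
def pvHints : List String := ["pdf", "html", "docx", "pptx", "xlsx", "plain_text"]

-- _ct_priority: loop 'for i, tokens in enumerate(levels)' with early return
def pvCtPriorityLoop (lowered : String) : List (Int × List String) → Int
  | [] => if PySem.Str.startswith lowered "text/" then 5 else 6
  | (i, tokens) :: rest =>
      if tokens.any (fun t => PySem.Str.isIn t lowered) then i
      else pvCtPriorityLoop lowered rest

def pvCtPriority (lowered : String) : Int :=
  pvCtPriorityLoop lowered (PySem.List.enumerate pvTokenLevels)

def parser_hint_from_metadata_py_alt (content_type : Option String) (file_type : String) : Option String :=
  let lowered := PySem.Str.lower (content_type.getD "")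
  let p := min (pvCtPriority lowered) (PySem.Dict.getD pvFtPriority file_type 6)
  if p < 6 then some (pvHints.getD p.toNat "") else none

-- ===== PRECONDITION & SPEC =====
def Spec_parser_hint_from_metadata_py (content_type : Option String) (file_type : String) (out : Option String) : Prop := out = parser_hint_from_metadata_py_alt content_type file_type
instance (content_type : Option String) (file_type : String) (out : Option String) : Decidable (Spec_parser_hint_from_metadata_py content_type file_type out) := by unfold Spec_parser_hint_from_metadata_py; infer_instance

-- ===== CLAIM =====
def Claim_equal_parser_hint_from_metadata_py : Prop := ∀ (content_type : Option String) (file_type : String), Dom_parser_hint_from_metadata_py content_type file_type → Spec_parser_hint_from_metadata_py content_type file_type (parser_hint_from_metadata_py content_type file_type)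

-- ===== LEMMAS AND PROOFS =====
-- characterise the file-type dict lookup as an if-chain over the eight keys
theorem pvFt_eq (f : String) : PySem.Dict.getD pvFtPriority f 6 =
    (if f == "pdf" then 0 else if f == "html" then 1 else if f == "doc" then 2
     else if f == "docx" then 2 else if f == "ppt" then 3 else if f == "pptx" then 3
     else if f == "xls" then 4 else if f == "xlsx" then 4 else 6) := by
  have hit : pvFtPriority.items = [("pdf", (0:Int)), ("html", 1), ("doc", 2), ("docx", 2), ("ppt", 3), ("pptx", 3), ("xls", 4), ("xlsx", 4)] := by decide
  simp only [PySem.Dict.getD, PySem.Dict.get?, hit]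
  split_ifs with h1 h2 h3 h4 h5 h6 h7 h8 <;>
    simp only [beq_iff_eq] at * <;>
    first
    | (subst_vars; decide)
    | (have e1 : ("pdf" == f) = false := by simp [Ne.symm h1]
       have e2 : ("html" == f) = false := by simp [Ne.symm h2]
       have e3 : ("doc" == f) = false := by simp [Ne.symm h3]
       have e4 : ("docx" == f) = false := by simp [Ne.symm h4]
       have e5 : ("ppt" == f) = false := by simp [Ne.symm h5]
       have e6 : ("pptx" == f) = false := by simp [Ne.symm h6]
       have e7 : ("xls" == f) = false := by simp [Ne.symm h7]
       have e8 : ("xlsx" == f) = false := by simp [Ne.symm h8]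
       simp [e1, e2, e3, e4, e5, e6, e7, e8])

-- ===== VERDICT =====
set_option maxHeartbeats 4000000 in
theorem parser_hint_from_metadata_py_spec : Claim_equal_parser_hint_from_metadata_py := by
  intro content_type file_type _
  unfold Spec_parser_hint_from_metadata_py parser_hint_from_metadata_py parser_hint_from_metadata_py_alt pvCtPriority pvTokenLevels pvHints
  rw [pvFt_eq]
  simp only [PySem.List.enumerate_cons, PySem.List.enumerate_nil, pvCtPriorityLoop,
    List.any_cons, List.any_nil, Bool.or_false]
  generalize (PySem.Str.isIn "pdf" (PySem.Str.lower (content_type.getD ""))) = a1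
  generalize (PySem.Str.isIn "html" (PySem.Str.lower (content_type.getD ""))) = a2
  generalize (PySem.Str.isIn "msword" (PySem.Str.lower (content_type.getD ""))) = a3
  generalize (PySem.Str.isIn "word" (PySem.Str.lower (content_type.getD ""))) = a4
  generalize (PySem.Str.isIn "powerpoint" (PySem.Str.lower (content_type.getD ""))) = a5
  generalize (PySem.Str.isIn "excel" (PySem.Str.lower (content_type.getD ""))) = a6
  generalize (PySem.Str.startswith (PySem.Str.lower (content_type.getD "")) "text/") = a7
  generalize (file_type == "pdf") = b1
  generalize (file_type == "html") = b2
  generalize (file_type == "doc") = b3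
  generalize (file_type == "docx") = b4
  generalize (file_type == "ppt") = b5
  generalize (file_type == "pptx") = b6
  generalize (file_type == "xls") = b7
  generalize (file_type == "xlsx") = b8
  revert a1 a2 a3 a4 a5 a6 a7 b1 b2 b3 b4 b5 b6 b7 b8
  decide
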